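-- pv_equiv track=rewrite | github.com/IncandelaLab/HEPServers | base/serialServer.py | partition_any
-- ===== SOURCE A (Python) =====
-- def partition_any(string,seps):
--     """partitions string at first instance of any element of seps"""
--     least_index = [len(string),-1]
--     for i,sep in enumerate(seps):
--         if sep in string:
--             index = string.index(sep)
--             if index < least_index[0]:
--                 least_index = [index,i]
--     if least_index[1] == -1:
--         return string,'',''
--     return string.partition(seps[least_index[1]])
-- ===== SOURCE B (Python) =====
-- def partition_any(string, seps):
--     """partitions string at first instance of any element of seps"""
--     for k in range(len(string)):
--         for sep in seps:
--             if string.startswith(sep, k):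
--                 return string[:k], sep, string[k + len(sep):]
--     return string, '', ''
-- ===== Notes on version B (the rewrite author's own statement) =====
-- stated objective: alternative
-- what changed: Replaces A's separator-major pass (first index of every separator, tracked as a running [least_index, sep_position] minimum, then str.partition) by a position-major scan of the string that returns at the first position where any separator matches, slicing there directly; the early return stops at the first match instead of locating every separator's first occurrence in the whole string.
import Mathlib
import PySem

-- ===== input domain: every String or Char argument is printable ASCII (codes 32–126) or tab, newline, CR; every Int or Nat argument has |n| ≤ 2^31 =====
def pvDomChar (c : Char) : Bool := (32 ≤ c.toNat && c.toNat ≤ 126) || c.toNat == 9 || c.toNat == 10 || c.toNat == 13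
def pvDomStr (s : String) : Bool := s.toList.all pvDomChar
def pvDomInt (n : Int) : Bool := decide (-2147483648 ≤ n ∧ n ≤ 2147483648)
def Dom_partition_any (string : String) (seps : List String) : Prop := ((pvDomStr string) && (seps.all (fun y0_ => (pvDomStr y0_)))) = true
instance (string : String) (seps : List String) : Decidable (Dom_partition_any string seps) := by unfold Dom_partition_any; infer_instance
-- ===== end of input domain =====

-- B replaces A's separator-major running-minimum scan by a position-major scan of the
-- string that returns at the first position where any separator matches (alternative
-- decomposition, same result; not claimed faster).


-- ===== PORT A =====
-- str.partition(sep) for sep ≠ "" (Pre_ excludes the empty separator): split at the first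
-- occurrence, (s, '', '') when sep does not occur; exact via PySem.Str.find, slices written
-- as take/drop since the cut indices are nonnegative and ≤ len(s).
def pyPartition (s : String) (sep : String) : String × String × String :=
  let i := PySem.Str.find s sep
  if i = -1 then (s, "", "")
  else (String.ofList (s.toList.take i.toNat), sep, String.ofList (s.toList.drop (i.toNat + sep.toList.length)))

def partition_any (string : String) (seps : List String) : String × String × String :=
  let least : Int × Int :=
    (PySem.List.enumerate seps).foldl
      (fun least p =>
        if PySem.Str.isIn p.2 string then
          -- string.index(sep): equal to string.find(sep) because 'sep in string' holds here
          if PySem.Str.find string p.2 < least.1 then (PySem.Str.find string p.2, p.1) else least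
        else least)
      (PySem.Str.len string, -1)
  if least.2 = -1 then (string, "", "")
  -- seps[least_index[1]]: the index is provably in range here, the default is never used
  else pyPartition string (PySem.List.pyGetD seps least.2 "")

-- ===== PORT B =====
-- string.startswith(sep, k) for 0 ≤ k ≤ len(string): exact as "sep is a prefix of string[k:]"
def startswithAt (string : String) (sep : String) (k : Nat) : Bool :=
  PySem.Chars.startswith (string.toList.drop k) sep.toList

def altLoop (string : String) (seps : List String) : List Nat → String × String × String
  | [] => (string, "", "")
  | k :: ks =>
    match seps.find? (fun sep => startswithAt string sep k) with
    -- string[:k], sep, string[k+len(sep):] with 0 ≤ k ≤ len(string): exact as take/drop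
    | some sep => (String.ofList (string.toList.take k), sep, String.ofList (string.toList.drop (k + sep.toList.length)))
    | none => altLoop string seps ks

def partition_any_alt (string : String) (seps : List String) : String × String × String :=
  altLoop string seps (List.range string.toList.length)

-- ===== PRECONDITION & SPEC =====
-- Pre_ excludes exactly the inputs on which A raises ValueError from str.partition(''): string
-- nonempty, '' among seps, and no separator listed before the first '' a prefix of the string
-- (there the empty separator wins A's minimum and is passed to str.partition).
def Pre_partition_any (string : String) (seps : List String) : Prop :=
  string = "" ∨ "" ∉ seps ∨ ∃ s ∈ seps.takeWhile (fun t => t ≠ ""), s.toList <+: string.toList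
instance (string : String) (seps : List String) : Decidable (Pre_partition_any string seps) := by unfold Pre_partition_any; infer_instance

def pvWitness_partition_any : String × List String := ("hello, wide world", [",", " "])

def Spec_partition_any (string : String) (seps : List String) (out : String × String × String) : Prop := out = partition_any_alt string seps
instance (string : String) (seps : List String) (out : String × String × String) : Decidable (Spec_partition_any string seps out) := by unfold Spec_partition_any; infer_instance

-- ===== CLAIM (what is proved, stated in full; the proofs are below) =====
def Claim_equal_partition_any : Prop := ∀ (string : String) (seps : List String), Dom_partition_any string seps → Pre_partition_any string seps → Spec_partition_any string seps (partition_any string seps)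

-- ===== LEMMAS AND PROOFS =====

-- A's loop body, on the List Char side
def stepA (cs : List Char) (least : Int × Int) (p : Int × String) : Int × Int :=
  if PySem.Chars.isIn p.2.toList cs then
    if PySem.Chars.find cs p.2.toList < least.1 then (PySem.Chars.find cs p.2.toList, p.1) else least
  else least

lemma foldA_nohit (cs : List Char) (l : List String) (k : Int) (acc : Int × Int)
    (h : ∀ sep ∈ l, PySem.Chars.isIn sep.toList cs = true → ¬ PySem.Chars.find cs sep.toList < acc.1) :
    (PySem.List.enumerate l k).foldl (stepA cs) acc = acc := by
  induction l generalizing k with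
  | nil => simp [PySem.List.enumerate]
  | cons x t ih =>
    have hstep : stepA cs acc (k, x) = acc := by
      unfold stepA
      by_cases hx : PySem.Chars.isIn x.toList cs = true
      · simp [hx, h x (by simp) hx]
      · simp [hx]
    simpa [PySem.List.enumerate, hstep] using ih (k + 1) (fun sep hs => h sep (by simp [hs]))

lemma foldA_hit (cs : List Char) (l : List String) (k : Int) (v0 w0 : Int) (j : Nat) (hj : j < l.length)
    (hocc : PySem.Chars.isIn l[j].toList cs = true)
    (hlt : PySem.Chars.find cs l[j].toList < v0)
    (hmin : ∀ sep ∈ l, PySem.Chars.isIn sep.toList cs = true →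
      PySem.Chars.find cs l[j].toList ≤ PySem.Chars.find cs sep.toList)
    (hfirst : ∀ j' (hj' : j' < j), PySem.Chars.isIn (l[j']'(Nat.lt_trans hj' hj)).toList cs = true →
      PySem.Chars.find cs l[j].toList < PySem.Chars.find cs (l[j']'(Nat.lt_trans hj' hj)).toList) :
    (PySem.List.enumerate l k).foldl (stepA cs) (v0, w0) = (PySem.Chars.find cs l[j].toList, k + j) := by
  induction l generalizing k v0 w0 j with
  | nil => simp at hj
  | cons x t ih =>
    rw [show PySem.List.enumerate (x :: t) k = (k, x) :: PySem.List.enumerate t (k + 1) by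
      simp [PySem.List.enumerate]]
    rw [List.foldl_cons]
    cases j with
    | zero =>
      have hx : PySem.Chars.isIn x.toList cs = true := by simpa using hocc
      have hxlt : PySem.Chars.find cs x.toList < v0 := by simpa using hlt
      have hstep : stepA cs (v0, w0) (k, x) = (PySem.Chars.find cs x.toList, k) := by
        unfold stepA; simp [hx, hxlt]
      rw [hstep]
      have := foldA_nohit cs t (k + 1) (PySem.Chars.find cs x.toList, k)
        (fun sep hs hin => by
          have := hmin sep (by simp [hs]) hin
          simpa using not_lt.mpr this)
      simpa using this
    | succ jj =>
      have hjj : jj < t.length := by simpa using hj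
      have hacc1 : PySem.Chars.find cs t[jj].toList < (stepA cs (v0, w0) (k, x)).1 := by
        unfold stepA
        by_cases hx : PySem.Chars.isIn x.toList cs = true
        · have hxlt := hfirst 0 (Nat.succ_pos jj) hx
          by_cases hcmp : PySem.Chars.find cs x.toList < v0
          · simpa [hx, hcmp] using hxlt
          · simpa [hx, hcmp] using hlt
        · simpa [hx] using hlt
      obtain ⟨a1, a2, h1⟩ : ∃ a1 a2, stepA cs (v0, w0) (k, x) = (a1, a2) := ⟨_, _, rfl⟩
      rw [h1]
      rw [h1] at hacc1
      have hocc' : PySem.Chars.isIn t[jj].toList cs = true := by simpa using hocc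
      have hmin' : ∀ sep ∈ t, PySem.Chars.isIn sep.toList cs = true →
          PySem.Chars.find cs t[jj].toList ≤ PySem.Chars.find cs sep.toList := by
        intro sep hs hin
        have := hmin sep (by simp [hs]) hin
        simpa using this
      have hfirst' : ∀ j' (hj' : j' < jj), PySem.Chars.isIn (t[j']'(Nat.lt_trans hj' hjj)).toList cs = true →
          PySem.Chars.find cs t[jj].toList < PySem.Chars.find cs (t[j']'(Nat.lt_trans hj' hjj)).toList := by
        intro j' hj' hin
        have := hfirst (j' + 1) (by omega) (by simpa using hin)
        simpa using this
      have := ih (k + 1) a1 a2 jj hjj hocc' hacc1 hmin' hfirst'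
      rw [this]
      have : (k + 1 + (jj : Int)) = k + ((jj : Nat) + 1 : Nat) := by push_cast; ring
      simp [this]

lemma altLoop_nohit (string : String) (seps : List String) (ks : List Nat)
    (h : ∀ k ∈ ks, seps.find? (fun sep => startswithAt string sep k) = none) :
    altLoop string seps ks = (string, "", "") := by
  induction ks with
  | nil => rfl
  | cons k ks ih =>
    rw [altLoop, h k (by simp)]
    exact ih (fun k' hk' => h k' (by simp [hk']))

lemma altLoop_hit (string : String) (seps : List String) (k0 : Nat) (sepB : String)
    (hfind : seps.find? (fun sep => startswithAt string sep k0) = some sepB) :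
    ∀ (m a : Nat), a ≤ k0 → k0 < a + m →
      (∀ k, a ≤ k → k < k0 → seps.find? (fun sep => startswithAt string sep k) = none) →
      altLoop string seps (List.range' a m) =
        (String.ofList (string.toList.take k0), sepB, String.ofList (string.toList.drop (k0 + sepB.toList.length))) := by
  intro m
  induction m with
  | zero => intro a h1 h2 _; omega
  | succ m ih =>
    intro a h1 h2 hnone
    rw [List.range'_succ, altLoop]
    rcases Nat.eq_or_lt_of_le h1 with heq | hlt
    · rw [heq, hfind]
    · rw [hnone a le_rfl hlt]
      exact ih (a + 1) hlt (by omega) (fun k hk1 hk2 => hnone k (by omega) hk2)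

lemma find_eq_natCast (cs : List Char) (sub : List Char) (k0 : Nat)
    (h1 : sub <+: cs.drop k0) (h2 : ∀ i < k0, ¬ sub <+: cs.drop i) :
    PySem.Chars.find cs sub = (k0 : Int) := by
  have hin : PySem.Chars.isIn sub cs = true :=
    (PySem.Chars.exists_prefix_drop_iff_isIn sub cs).1 ⟨k0, h1⟩
  have h0 : 0 ≤ PySem.Chars.find cs sub := (PySem.Chars.find_nonneg_iff cs sub).2
    ((PySem.Chars.isIn_iff_infix sub cs).1 hin)
  obtain ⟨hp, hmin⟩ := PySem.Chars.find_spec h0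
  rcases lt_trichotomy (PySem.Chars.find cs sub).toNat k0 with hc | hc | hc
  · exact absurd hp (h2 _ hc)
  · omega
  · exact absurd h1 (hmin k0 hc)

theorem partition_any_spec : Claim_equal_partition_any := by
  intro string seps _ hpre
  show partition_any string seps = partition_any_alt string seps
  have hstep : (fun (least : Int × Int) (p : Int × String) =>
      if PySem.Str.isIn p.2 string then
        if PySem.Str.find string p.2 < least.1 then (PySem.Str.find string p.2, p.1) else least
      else least) = stepA string.toList := by
    funext least p
    simp [stepA]
  by_cases H : ∀ sep ∈ seps, PySem.Chars.isIn sep.toList string.toList = true →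
      ¬ PySem.Chars.find string.toList sep.toList < (string.toList.length : Int)
  · have hA : partition_any string seps = (string, "", "") := by
      unfold partition_any
      rw [hstep, PySem.Str.len_eq, foldA_nohit string.toList seps 0 _
        (fun sep hs hin => H sep hs hin)]
      simp
    have hB : partition_any_alt string seps = (string, "", "") := by
      unfold partition_any_alt
      apply altLoop_nohit
      intro k hk
      rw [List.find?_eq_none]
      intro sep hs hsw
      have hp : sep.toList <+: string.toList.drop k :=
        (PySem.Chars.startswith_iff _ _).1 (by simpa [startswithAt] using hsw)
      have hin : PySem.Chars.isIn sep.toList string.toList = true :=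
        (PySem.Chars.exists_prefix_drop_iff_isIn _ _).1 ⟨k, hp⟩
      have h0 : 0 ≤ PySem.Chars.find string.toList sep.toList :=
        (PySem.Chars.find_nonneg_iff _ _).2 ((PySem.Chars.isIn_iff_infix _ _).1 hin)
      obtain ⟨_, hmin⟩ := PySem.Chars.find_spec h0
      have hle : (PySem.Chars.find string.toList sep.toList).toNat ≤ k := by
        by_contra hgt
        exact hmin k (by omega) hp
      have hkn : k < string.toList.length := List.mem_range.1 hk
      exact H sep hs hin (by omega)
    rw [hA, hB]
  · push Not at H
    obtain ⟨sep0, hm0, hocc0, hflt0⟩ := H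
    have hPex : ∃ k, ∃ sep ∈ seps, sep.toList <+: string.toList.drop k := by
      obtain ⟨j, hj⟩ := (PySem.Chars.exists_prefix_drop_iff_isIn sep0.toList string.toList).2 hocc0
      exact ⟨j, sep0, hm0, hj⟩
    set k0 := Nat.find hPex with hk0def

    have hPk0 := Nat.find_spec hPex
    have hk0min : ∀ i, i < k0 → ¬ ∃ sep ∈ seps, sep.toList <+: string.toList.drop i :=
      fun i hi => Nat.find_min hPex hi
    have hsome : (seps.find? (fun sep => startswithAt string sep k0)).isSome := by
      rw [List.find?_isSome]
      obtain ⟨sep, hs, hp⟩ := hPk0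
      exact ⟨sep, hs, by simpa [startswithAt] using (PySem.Chars.startswith_iff _ _).2 hp⟩
    obtain ⟨sepB, hfind⟩ := Option.isSome_iff_exists.1 hsome
    have hmemB := List.mem_of_find?_eq_some hfind
    have hprefB : sepB.toList <+: string.toList.drop k0 :=
      (PySem.Chars.startswith_iff _ _).1 (by simpa [startswithAt] using List.find?_some hfind)
    have hk0n : k0 < string.toList.length := by
      have h0 : 0 ≤ PySem.Chars.find string.toList sep0.toList :=
        (PySem.Chars.find_nonneg_iff _ _).2 ((PySem.Chars.isIn_iff_infix _ _).1 hocc0)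
      obtain ⟨hp0, _⟩ := PySem.Chars.find_spec h0
      have := Nat.find_min' hPex ⟨sep0, hm0, hp0⟩
      omega
    have hfindB : PySem.Chars.find string.toList sepB.toList = (k0 : Int) :=
      find_eq_natCast _ _ _ hprefB (fun i hi hp => hk0min i hi ⟨sepB, hmemB, hp⟩)
    obtain ⟨hpB, j, hj, hgetj, hbefore⟩ := List.find?_eq_some_iff_getElem.1 hfind
    have hminAll : ∀ sep ∈ seps, PySem.Chars.isIn sep.toList string.toList = true →
        (k0 : Int) ≤ PySem.Chars.find string.toList sep.toList := by
      intro sep hs hin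
      have h0 : 0 ≤ PySem.Chars.find string.toList sep.toList :=
        (PySem.Chars.find_nonneg_iff _ _).2 ((PySem.Chars.isIn_iff_infix _ _).1 hin)
      obtain ⟨hp, _⟩ := PySem.Chars.find_spec h0
      have := Nat.find_min' hPex ⟨sep, hs, hp⟩
      omega
    have hfold := foldA_hit string.toList seps 0 (string.toList.length : Int) (-1) j hj
      (by rw [hgetj]; exact (PySem.Chars.exists_prefix_drop_iff_isIn _ _).1 ⟨k0, hprefB⟩)
      (by rw [hgetj, hfindB]; exact_mod_cast hk0n)
      (by intro sep hs hin; rw [hgetj, hfindB]; exact hminAll sep hs hin)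
      (by
        intro j' hj' hin
        rw [hgetj, hfindB]
        have hle := hminAll _ (List.getElem_mem _) hin
        rcases lt_or_eq_of_le hle with h | h
        · exact h
        · exfalso
          have h0 : 0 ≤ PySem.Chars.find string.toList (seps[j']'(Nat.lt_trans hj' hj)).toList := by omega
          obtain ⟨hp, _⟩ := PySem.Chars.find_spec h0
          have htn : (PySem.Chars.find string.toList (seps[j']'(Nat.lt_trans hj' hj)).toList).toNat = k0 := by omega
          rw [htn] at hp
          have := hbefore j' hj'
          simp [startswithAt, (PySem.Chars.startswith_iff _ _).2 hp] at this)
    have hA : partition_any string seps =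
        (String.ofList (string.toList.take k0), sepB, String.ofList (string.toList.drop (k0 + sepB.toList.length))) := by
      unfold partition_any
      rw [hstep, PySem.Str.len_eq, hfold, hgetj, hfindB]
      simp only [zero_add]
      rw [if_neg (show ¬((j : Int) = -1) by omega)]
      rw [PySem.List.pyGetD_natCast, List.getD_eq_getElem seps "" hj, hgetj]
      unfold pyPartition
      rw [PySem.Str.find_eq, hfindB]
      rw [if_neg (show ¬((k0 : Int) = -1) by omega)]
      simp
    have hB : partition_any_alt string seps =
        (String.ofList (string.toList.take k0), sepB, String.ofList (string.toList.drop (k0 + sepB.toList.length))) := by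
      unfold partition_any_alt
      rw [List.range_eq_range']
      refine altLoop_hit string seps k0 sepB hfind _ 0 (Nat.zero_le _) (by omega) ?_
      intro k _ hk2
      rw [List.find?_eq_none]
      intro sep hs hsw
      have hp : sep.toList <+: string.toList.drop k :=
        (PySem.Chars.startswith_iff _ _).1 (by simpa [startswithAt] using hsw)
      exact hk0min k hk2 ⟨sep, hs, hp⟩
    rw [hA, hB]
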